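-- pv_equiv track=rewrite | github.com/bee0511/INP | lab3/lab3_4.py | dfs_explore
-- ===== SOURCE A (Python) =====
-- WALL = "#"
--
-- def dfs_explore(maze, x, y, path, visited):
--     if x == 0 or y == 0 or x == len(maze) - 1 or y == len(maze[0]) - 1:
--         return path
--
--     moves = [(-1, 0), (0, -1), (1, 0), (0, 1)]
--     move_symbols = ['W', 'A', 'S', 'D']
--
--     for move, (dx, dy) in enumerate(moves):
--         new_x, new_y = x + dx, y + dy
--         if 0 <= new_x < len(maze) and 0 <= new_y < len(maze[0]) and maze[new_x][new_y] != WALL and not visited[new_x][new_y]: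
--             visited[new_x][new_y] = True
--             path.append(move_symbols[move])
--             result = dfs_explore(maze, new_x, new_y, path, visited)
--             if result is not None:
--                 return result
--             path.pop()
--
--     return None
-- ===== SOURCE B (Python) =====
-- WALL = "#"
--
-- def dfs_explore(maze, x, y, path, visited):
--     # Iterative DFS over an explicit stack of (cell, remaining-moves) frames;
--     # same visit order and same path/visited mutation as the recursive version.
--     if x == 0 or y == 0 or x == len(maze) - 1 or y == len(maze[0]) - 1:
--         return path
--     all_moves = [(-1, 0, 'W'), (0, -1, 'A'), (1, 0, 'S'), (0, 1, 'D')]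
--     stack = [(x, y, all_moves)]
--     while stack:
--         cx, cy, rem = stack.pop()
--         found = None
--         while rem:
--             dx, dy, sym = rem[0]
--             rem = rem[1:]
--             nx, ny = cx + dx, cy + dy
--             if 0 <= nx < len(maze) and 0 <= ny < len(maze[0]) and maze[nx][ny] != WALL and not visited[nx][ny]:
--                 found = (nx, ny, sym)
--                 break
--         if found is None:
--             if stack:
--                 path.pop()
--         else:
--             nx, ny, sym = found
--             visited[nx][ny] = True
--             path.append(sym)
--             if nx == 0 or ny == 0 or nx == len(maze) - 1 or ny == len(maze[0]) - 1:
--                 return path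
--             stack.append((cx, cy, rem))
--             stack.append((nx, ny, all_moves))
--     return None
-- ===== Notes on version B (the rewrite author's own statement) =====
-- stated objective: alternative
-- what changed: The recursive backtracking DFS is rewritten as an iterative loop over an explicit stack of (cell, remaining-moves) frames with mark-on-selection, preserving the exact visit order, returned path and in-place mutations.
import Mathlib
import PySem

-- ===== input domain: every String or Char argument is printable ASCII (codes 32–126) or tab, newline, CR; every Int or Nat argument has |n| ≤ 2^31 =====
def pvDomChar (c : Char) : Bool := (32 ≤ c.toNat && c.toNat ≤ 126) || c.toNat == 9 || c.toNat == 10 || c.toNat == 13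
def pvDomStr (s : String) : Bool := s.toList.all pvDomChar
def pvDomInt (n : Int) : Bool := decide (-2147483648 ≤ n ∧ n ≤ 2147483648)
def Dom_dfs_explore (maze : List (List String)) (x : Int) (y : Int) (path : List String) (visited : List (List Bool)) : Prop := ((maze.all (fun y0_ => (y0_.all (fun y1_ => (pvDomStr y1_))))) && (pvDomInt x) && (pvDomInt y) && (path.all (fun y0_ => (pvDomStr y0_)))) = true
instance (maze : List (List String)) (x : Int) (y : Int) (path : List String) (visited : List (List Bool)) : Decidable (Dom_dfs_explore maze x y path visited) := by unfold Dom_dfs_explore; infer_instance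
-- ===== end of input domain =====

-- B rewrites the recursive DFS as an explicit-stack loop (one neighbour tried per frame,
-- mark-on-selection), same visit order; equivalence proved for the RETURN value (both
-- Pythons also perform the same in-place mutation of path/visited, not modelled here).


-- ===== PORT A =====
-- shared primitives (the same tests both Pythons perform, step for step)
-- border test: x == 0 or y == 0 or x == len(maze)-1 or y == len(maze[0])-1
def pvBorder (maze : List (List String)) (x y : Int) : Bool :=
  x == 0 || y == 0 || x == (maze.length : Int) - 1 || y == ((maze.headD []).length : Int) - 1

-- the four moves with their symbols, in Python's order
def pvMoves : List (Int × Int × String) := [(-1, 0, "W"), (0, -1, "A"), (1, 0, "S"), (0, 1, "D")]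

-- 0 <= nx < len(maze) and 0 <= ny < len(maze[0]) and maze[nx][ny] != WALL and not visited[nx][ny]
-- (the getD defaults are unreachable under Pre_, which guarantees the shapes)
def pvCellOK (maze : List (List String)) (visited : List (List Bool)) (nx ny : Int) : Bool :=
  decide (0 ≤ nx) && decide (nx < (maze.length : Int)) && decide (0 ≤ ny) &&
    decide (ny < ((maze.headD []).length : Int)) &&
    ((maze.getD nx.toNat []).getD ny.toNat "" != "#") &&
    !((visited.getD nx.toNat []).getD ny.toNat true)

-- visited[nx][ny] = True
def pvMark (visited : List (List Bool)) (nx ny : Int) : List (List Bool) :=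
  visited.modify nx.toNat (fun row => row.set ny.toNat true)

-- A's recursion, with the mutated path/visited threaded as values and a fuel counter
-- (the outer `none` means out of fuel; pvFuelA is proved sufficient below).
mutual
def dfsA (maze : List (List String)) (f : Nat) (x y : Int) (path : List String)
    (vis : List (List Bool)) : Option (Option (List String) × List (List Bool)) :=
  match f with
  | 0 => none
  | f' + 1 =>
    if pvBorder maze x y then some (some path, vis)
    else loopA maze f' x y pvMoves path vis
termination_by (f, 0)

def loopA (maze : List (List String)) (f : Nat) (x y : Int)
    (ms : List (Int × Int × String)) (path : List String) (vis : List (List Bool)) :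
    Option (Option (List String) × List (List Bool)) :=
  match ms with
  | [] => some (none, vis)
  | (dx, dy, sym) :: rest =>
    if pvCellOK maze vis (x + dx) (y + dy) then
      match dfsA maze f (x + dx) (y + dy) (path ++ [sym]) (pvMark vis (x + dx) (y + dy)) with
      | none => none
      | some (some r, v2) => some (some r, v2)
      | some (none, v2) => loopA maze f x y rest path v2
    else loopA maze f x y rest path vis
termination_by (f, ms.length + 1)
end

def pvFuelA (visited : List (List Bool)) : Nat := (visited.map List.length).sum + 1

def dfs_explore (maze : List (List String)) (x : Int) (y : Int) (path : List String)
    (visited : List (List Bool)) : Option (List String) :=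
  match dfsA maze (pvFuelA visited) x y path visited with
  | some (r, _) => r
  | none => none

-- ===== PORT B =====
-- inner while: scan the remaining moves of the top frame for the first usable neighbour
def pvScan (maze : List (List String)) (vis : List (List Bool)) (x y : Int) :
    List (Int × Int × String) → Option (Int × Int × String × List (Int × Int × String))
  | [] => none
  | (dx, dy, sym) :: rest =>
    if pvCellOK maze vis (x + dx) (y + dy) then some (x + dx, y + dy, sym, rest)
    else pvScan maze vis x y rest

-- outer while over the explicit stack of (cell, remaining-moves) frames
def loopB (maze : List (List String)) :
    Nat → List (Int × Int × List (Int × Int × String)) → List String →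
    List (List Bool) → Option (Option (List String))
  | 0, _, _, _ => none
  | _ + 1, [], _, _ => some none
  | f' + 1, (cx, cy, rem) :: stk, path, vis =>
    match pvScan maze vis cx cy rem with
    | none =>
      if stk.isEmpty then loopB maze f' stk path vis
      else loopB maze f' stk path.dropLast vis
    | some (nx, ny, sym, rem') =>
      let vis' := pvMark vis nx ny
      let path' := path ++ [sym]
      if pvBorder maze nx ny then some (some path')
      else loopB maze f' ((nx, ny, pvMoves) :: (cx, cy, rem') :: stk) path' vis'

def pvFuelB (visited : List (List Bool)) : Nat := 2 * (visited.map List.length).sum + 3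

def dfs_explore_alt (maze : List (List String)) (x : Int) (y : Int) (path : List String)
    (visited : List (List Bool)) : Option (List String) :=
  if pvBorder maze x y then some path
  else
    match loopB maze (pvFuelB visited) [(x, y, pvMoves)] path visited with
    | some r => r
    | none => none

-- ===== PRECONDITION & SPEC =====
-- Pre_ excludes the shape-broken inputs on which Python A raises IndexError (empty maze
-- reached past the border test, a row shorter than row 0, or visited smaller than the maze).
-- Admitted are: well-shaped inputs, starts the border test accepts at once, and starts all of
-- whose neighbours fail the bounds guard; a few shape-broken inputs on which A happens to
-- return before touching a missing cell (see claim cites) are also excluded.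
def Pre_dfs_explore (maze : List (List String)) (x : Int) (y : Int) (path : List String) (visited : List (List Bool)) : Prop :=
  ((maze = [] → (x = 0 ∨ x = -1 ∨ y = 0)) ∧
    (∀ row ∈ maze, (maze.headD []).length ≤ row.length) ∧
    maze.length ≤ visited.length ∧
    (∀ row ∈ visited, (maze.headD []).length ≤ row.length)) ∨
  (maze = [] ∧ (x = 0 ∨ x = -1 ∨ y = 0)) ∨
  (maze ≠ [] ∧ (x = 0 ∨ y = 0 ∨ x = (maze.length : Int) - 1 ∨
    y = ((maze.headD []).length : Int) - 1)) ∨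
  (maze ≠ [] ∧
    ¬(-1 ≤ x ∧ x ≤ (maze.length : Int) ∧ 0 ≤ y ∧ y < ((maze.headD []).length : Int)) ∧
    ¬(0 ≤ x ∧ x < (maze.length : Int) ∧ -1 ≤ y ∧ y ≤ ((maze.headD []).length : Int)))
instance (maze : List (List String)) (x : Int) (y : Int) (path : List String) (visited : List (List Bool)) : Decidable (Pre_dfs_explore maze x y path visited) := by unfold Pre_dfs_explore; infer_instance

def pvWitness_dfs_explore : List (List String) × Int × Int × List String × List (List Bool) :=
  ([["#", "."], [".", "."]], 1, 1, [], [[false, false], [false, false]])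

def Spec_dfs_explore (maze : List (List String)) (x : Int) (y : Int) (path : List String) (visited : List (List Bool)) (out : Option (List String)) : Prop := out = dfs_explore_alt maze x y path visited
instance (maze : List (List String)) (x : Int) (y : Int) (path : List String) (visited : List (List Bool)) (out : Option (List String)) : Decidable (Spec_dfs_explore maze x y path visited out) := by unfold Spec_dfs_explore; infer_instance

-- ===== CLAIM (what is proved, stated in full; the proofs are below) =====
def Claim_equal_dfs_explore : Prop := ∀ (maze : List (List String)) (x : Int) (y : Int) (path : List String) (visited : List (List Bool)), Dom_dfs_explore maze x y path visited → Pre_dfs_explore maze x y path visited → Spec_dfs_explore maze x y path visited (dfs_explore maze x y path visited)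

-- ===== LEMMAS AND PROOFS =====

-- number of unvisited cells; strictly decreases at every mark of an OK cell
def cntRow (r : List Bool) : Nat := r.countP (fun b => !b)
def cntF (v : List (List Bool)) : Nat := (v.map cntRow).sum

theorem cntRow_set_lt (r : List Bool) (j : Nat) (h : r.getD j true = false) :
    cntRow (r.set j true) < cntRow r := by
  induction r generalizing j with
  | nil => simp at h
  | cons b t ih =>
    cases j with
    | zero =>
      simp at h
      subst h
      simp [cntRow, List.countP_cons]
    | succ j =>
      simp at h
      have := ih j h
      simp [cntRow, List.countP_cons] at this ⊢
      omega

theorem cntF_mark_lt (vis : List (List Bool)) (nx ny : Int)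
    (h : (vis.getD nx.toNat []).getD ny.toNat true = false) :
    cntF (pvMark vis nx ny) < cntF vis := by
  unfold pvMark
  generalize nx.toNat = i at h ⊢
  generalize ny.toNat = j at h ⊢
  induction vis generalizing i with
  | nil => simp at h
  | cons r t ih =>
    cases i with
    | zero =>
      simp at h
      have := cntRow_set_lt r j h
      simp [cntF, List.modify]
      omega
    | succ i =>
      simp at h
      have := ih i h
      simp [cntF, List.modify] at this ⊢
      omega

theorem cellOK_false (maze : List (List String)) (vis : List (List Bool)) (nx ny : Int)
    (h : pvCellOK maze vis nx ny = true) :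
    (vis.getD nx.toNat []).getD ny.toNat true = false := by
  unfold pvCellOK at h
  simp only [Bool.and_eq_true, Bool.not_eq_true'] at h
  exact h.2

theorem cntF_mark_lt' (maze : List (List String)) (vis : List (List Bool)) (nx ny : Int)
    (h : pvCellOK maze vis nx ny = true) : cntF (pvMark vis nx ny) < cntF vis :=
  cntF_mark_lt vis nx ny (cellOK_false maze vis nx ny h)

theorem cntF_le_sum (vis : List (List Bool)) : cntF vis ≤ (vis.map List.length).sum := by
  induction vis with
  | nil => simp [cntF]
  | cons r t ih =>
    have := List.countP_le_length (l := r) (p := fun b => !b)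
    simp [cntF] at ih ⊢
    simp [cntRow] at *
    omega

-- visited only grows: cntF never increases along a successful run of A
theorem monoA (maze : List (List String)) :
    ∀ f, (∀ x y path vis o v2, dfsA maze f x y path vis = some (o, v2) → cntF v2 ≤ cntF vis) ∧
      (∀ ms x y path vis o v2, loopA maze f x y ms path vis = some (o, v2) → cntF v2 ≤ cntF vis) := by
  intro f
  induction f using Nat.strong_induction_on with
  | _ f IH =>
    have hd : ∀ x y path vis o v2, dfsA maze f x y path vis = some (o, v2) → cntF v2 ≤ cntF vis := by
      intro x y path vis o v2 h
      match f with
      | 0 => rw [dfsA] at h; exact absurd h (by simp)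
      | f' + 1 =>
        rw [dfsA] at h
        split at h
        · simp at h; rw [← h.2]
        · exact (IH f' (by omega)).2 _ _ _ _ _ _ _ h
    refine ⟨hd, ?_⟩
    intro ms
    induction ms with
    | nil =>
      intro x y path vis o v2 h
      rw [loopA] at h
      simp at h
      rw [← h.2]
    | cons m rest ihms =>
      obtain ⟨dx, dy, sym⟩ := m
      intro x y path vis o v2 h
      rw [loopA] at h
      by_cases hOK : pvCellOK maze vis (x + dx) (y + dy) = true
      · rw [if_pos hOK] at h
        have hmark := cntF_mark_lt' maze vis (x + dx) (y + dy) hOK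
        cases hdfs : dfsA maze f (x + dx) (y + dy) (path ++ [sym]) (pvMark vis (x + dx) (y + dy)) with
        | none => rw [hdfs] at h; exact absurd h (by simp)
        | some pr =>
          obtain ⟨o', v2'⟩ := pr
          have h2' : cntF v2' ≤ cntF (pvMark vis (x + dx) (y + dy)) := hd _ _ _ _ _ _ hdfs
          rw [hdfs] at h
          cases o' with
          | some r =>
            simp at h
            rw [← h.2]
            omega
          | none =>
            simp at h
            have := ihms _ _ _ _ _ _ h
            omega
      · rw [if_neg hOK] at h
        exact ihms _ _ _ _ _ _ h

-- pvFuelA is enough fuel: A's recursion depth is bounded by the number of unvisited cells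
theorem suffA (maze : List (List String)) :
    ∀ f, (∀ x y path vis, cntF vis < f → dfsA maze f x y path vis ≠ none) ∧
      (∀ ms x y path vis, cntF vis ≤ f → loopA maze f x y ms path vis ≠ none) := by
  intro f
  induction f using Nat.strong_induction_on with
  | _ f IH =>
    have hd : ∀ x y path vis, cntF vis < f → dfsA maze f x y path vis ≠ none := by
      intro x y path vis hlt
      match f with
      | 0 => omega
      | f' + 1 =>
        rw [dfsA]
        split
        · simp
        · exact (IH f' (by omega)).2 _ _ _ _ _ (by omega)
    refine ⟨hd, ?_⟩
    intro ms
    induction ms with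
    | nil => intro x y path vis _; rw [loopA]; simp
    | cons m rest ihms =>
      obtain ⟨dx, dy, sym⟩ := m
      intro x y path vis hle
      rw [loopA]
      by_cases hOK : pvCellOK maze vis (x + dx) (y + dy) = true
      · rw [if_pos hOK]
        have hmark := cntF_mark_lt' maze vis (x + dx) (y + dy) hOK
        cases hdfs : dfsA maze f (x + dx) (y + dy) (path ++ [sym]) (pvMark vis (x + dx) (y + dy)) with
        | none => exact absurd hdfs (hd _ _ _ _ (by omega))
        | some pr =>
          obtain ⟨o', v2'⟩ := pr
          have h2' : cntF v2' ≤ cntF (pvMark vis (x + dx) (y + dy)) :=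
            (monoA maze f).1 _ _ _ _ _ _ hdfs
          cases o' with
          | some r => simp
          | none => exact ihms _ _ _ _ (by omega)
      · rw [if_neg hOK]
        exact ihms _ _ _ _ hle

-- B's loop is fuel-monotone: once it answers, more fuel gives the same answer
theorem monoB (maze : List (List String)) :
    ∀ f stack path vis r, loopB maze f stack path vis = some r →
      loopB maze (f + 1) stack path vis = some r := by
  intro f
  induction f with
  | zero => intro stack path vis r h; rw [loopB] at h; exact absurd h (by simp)
  | succ f ih =>
    intro stack path vis r h
    cases stack with
    | nil => rw [loopB] at h; rw [loopB]; exact h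
    | cons fr stk =>
      obtain ⟨cx, cy, rem⟩ := fr
      rw [loopB] at h
      rw [loopB]
      generalize hscan : pvScan maze vis cx cy rem = sc at h ⊢
      cases sc with
      | none =>
        by_cases he : stk.isEmpty = true
        · rw [if_pos he] at h ⊢; exact ih _ _ _ _ h
        · rw [if_neg he] at h ⊢; exact ih _ _ _ _ h
      | some q =>
        obtain ⟨nx, ny, sym, rem'⟩ := q
        simp only [] at h ⊢
        by_cases hb : pvBorder maze nx ny = true
        · rw [if_pos hb] at h ⊢; exact h
        · rw [if_neg hb] at h ⊢; exact ih _ _ _ _ h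

theorem monoB_le (maze : List (List String)) {f g : Nat} (hfg : f ≤ g) :
    ∀ stack path vis r, loopB maze f stack path vis = some r →
      loopB maze g stack path vis = some r := by
  induction g with
  | zero =>
    intro stack path vis r h
    have : f = 0 := by omega
    subst this; exact h
  | succ g ih =>
    intro stack path vis r h
    rcases Nat.lt_or_ge f (g + 1) with hlt | hge
    · exact monoB maze g stack path vis r (ih (by omega) _ _ _ _ h)
    · have : f = g + 1 := by omega
      subst this; exact h

-- a successful scan returns a cell that passed pvCellOK
theorem pvScan_ok (maze : List (List String)) (vis : List (List Bool)) (cx cy : Int) :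
    ∀ rem nx ny sym rem', pvScan maze vis cx cy rem = some (nx, ny, sym, rem') →
      pvCellOK maze vis nx ny = true := by
  intro rem
  induction rem with
  | nil => intro nx ny sym rem' h; rw [pvScan] at h; exact absurd h (by simp)
  | cons m mrest ih =>
    obtain ⟨dx, dy, s⟩ := m
    intro nx ny sym rem' h
    rw [pvScan] at h
    by_cases hc : pvCellOK maze vis (cx + dx) (cy + dy) = true
    · rw [if_pos hc] at h
      simp at h
      obtain ⟨h1, h2, _, _⟩ := h
      rw [← h1, ← h2]; exact hc
    · rw [if_neg hc] at h
      exact ih _ _ _ _ h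

-- pvFuelB is enough fuel: each iteration pops a frame or marks a fresh cell
theorem suffB (maze : List (List String)) :
    ∀ f stack path vis, stack.length + 2 * cntF vis < f →
      loopB maze f stack path vis ≠ none := by
  intro f
  induction f with
  | zero => intro stack path vis h; omega
  | succ f ih =>
    intro stack path vis h
    cases stack with
    | nil => rw [loopB]; simp
    | cons fr stk =>
      obtain ⟨cx, cy, rem⟩ := fr
      rw [loopB]
      generalize hscan : pvScan maze vis cx cy rem = sc
      cases sc with
      | none =>
        by_cases he : stk.isEmpty = true
        · rw [if_pos he]; exact ih _ _ _ (by simp at h ⊢; omega)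
        · rw [if_neg he]; exact ih _ _ _ (by simp at h ⊢; omega)
      | some q =>
        obtain ⟨nx, ny, sym, rem'⟩ := q
        simp only []
        by_cases hb : pvBorder maze nx ny = true
        · rw [if_pos hb]; simp
        · rw [if_neg hb]
          have hOK : pvCellOK maze vis nx ny = true := pvScan_ok maze vis cx cy rem nx ny sym rem' hscan
          have hmark := cntF_mark_lt' maze vis nx ny hOK
          exact ih _ _ _ (by simp at h ⊢; omega)

-- the frame-by-frame simulation: a loopA run from (x,y) corresponds to running loopB with
-- the frame (x,y,ms) on top of any stack stk, provided the continuation below agrees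
theorem bridge (maze : List (List String)) :
    ∀ f ms x y path vis out v2,
      loopA maze f x y ms path vis = some (out, v2) →
      ∀ stk res,
        (out = none → ∃ g, loopB maze g stk path.dropLast v2 = some res) →
        (∀ r, out = some r → res = some r) →
        ∃ fb, loopB maze fb ((x, y, ms) :: stk) path vis = some res := by
  intro f
  induction f using Nat.strong_induction_on with
  | _ f IH =>
    intro ms
    induction ms with
    | nil =>
      intro x y path vis out v2 h stk res h1 h2
      rw [loopA] at h
      simp at h
      obtain ⟨ho, hv⟩ := h
      subst hv
      obtain ⟨g, hg⟩ := h1 ho.symm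
      cases g with
      | zero => rw [loopB] at hg; exact absurd hg (by simp)
      | succ g' =>
        refine ⟨g' + 1 + 1, ?_⟩
        rw [loopB]
        rw [pvScan]
        simp only []
        cases stk with
        | nil =>
          rw [if_pos (by simp)]
          rw [loopB] at hg ⊢
          exact hg
        | cons a b =>
          rw [if_neg (by simp)]
          exact hg
    | cons m rest ihms =>
      obtain ⟨dx, dy, sym⟩ := m
      intro x y path vis out v2 h stk res h1 h2
      rw [loopA] at h
      by_cases hOK : pvCellOK maze vis (x + dx) (y + dy) = true
      · rw [if_pos hOK] at h
        have hscan : pvScan maze vis x y ((dx, dy, sym) :: rest) =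
            some (x + dx, y + dy, sym, rest) := by
          rw [pvScan]; rw [if_pos hOK]
        cases hdfs : dfsA maze f (x + dx) (y + dy) (path ++ [sym]) (pvMark vis (x + dx) (y + dy)) with
        | none => rw [hdfs] at h; exact absurd h (by simp)
        | some pr =>
          obtain ⟨o', v2'⟩ := pr
          rw [hdfs] at h
          cases f with
          | zero => rw [dfsA] at hdfs; exact absurd hdfs (by simp)
          | succ f' =>
            rw [dfsA] at hdfs
            by_cases hb : pvBorder maze (x + dx) (y + dy) = true
            · rw [if_pos hb] at hdfs
              simp at hdfs
              obtain ⟨ho', hv'⟩ := hdfs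
              subst ho'
              simp only [] at h
              simp at h
              obtain ⟨hout, hv2⟩ := h
              refine ⟨1, ?_⟩
              rw [loopB]
              rw [hscan]
              simp only []
              rw [if_pos hb]
              rw [h2 (path ++ [sym]) hout.symm]
            · rw [if_neg hb] at hdfs
              cases o' with
              | some r =>
                simp only [] at h
                simp at h
                obtain ⟨hout, hv2⟩ := h
                have hres : res = some r := h2 r hout.symm
                obtain ⟨fb1, hfb1⟩ :=
                  IH f' (by omega) pvMoves (x + dx) (y + dy) (path ++ [sym])
                    (pvMark vis (x + dx) (y + dy)) (some r) v2' hdfs ((x, y, rest) :: stk) res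
                    (by intro hc; exact absurd hc (by simp))
                    (by intro r' hr'; rw [hres]; injection hr' with hr''; rw [hr''])
                refine ⟨fb1 + 1, ?_⟩
                rw [loopB]
                rw [hscan]
                simp only []
                rw [if_neg hb]
                exact hfb1
              | none =>
                simp only [] at h
                obtain ⟨fb2, hfb2⟩ := ihms x y path v2' out v2 h stk res h1 h2
                obtain ⟨fb1, hfb1⟩ :=
                  IH f' (by omega) pvMoves (x + dx) (y + dy) (path ++ [sym])
                    (pvMark vis (x + dx) (y + dy)) none v2' hdfs ((x, y, rest) :: stk) res
                    (by
                      intro _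
                      refine ⟨fb2, ?_⟩
                      rw [List.dropLast_concat]
                      exact hfb2)
                    (by intro r hr; exact absurd hr (by simp))
                refine ⟨fb1 + 1, ?_⟩
                rw [loopB]
                rw [hscan]
                simp only []
                rw [if_neg hb]
                exact hfb1
      · rw [if_neg hOK] at h
        have hscan : pvScan maze vis x y ((dx, dy, sym) :: rest) = pvScan maze vis x y rest := by
          rw [pvScan]; rw [if_neg hOK]
        obtain ⟨fb, hfb⟩ := ihms x y path vis out v2 h stk res h1 h2
        cases fb with
        | zero => rw [loopB] at hfb; exact absurd hfb (by simp)
        | succ fb' =>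
          refine ⟨fb' + 1, ?_⟩
          rw [loopB] at hfb ⊢
          rw [hscan]
          exact hfb

-- ===== VERDICT (by name: the statement is the Claim_ definition above) =====
theorem dfs_explore_spec : Claim_equal_dfs_explore := by
  intro maze x y path visited _dom _pre
  unfold Spec_dfs_explore
  unfold dfs_explore dfs_explore_alt
  by_cases hb : pvBorder maze x y = true
  · have hA : dfsA maze (pvFuelA visited) x y path visited = some (some path, visited) := by
      rw [pvFuelA, dfsA, if_pos hb]
    rw [hA, if_pos hb]
  · have hcnt := cntF_le_sum visited
    have hA : dfsA maze (pvFuelA visited) x y path visited ≠ none :=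
      (suffA maze _).1 _ _ _ _ (by rw [pvFuelA]; omega)
    cases hd : dfsA maze (pvFuelA visited) x y path visited with
    | none => exact absurd hd hA
    | some pr =>
      obtain ⟨out, v2⟩ := pr
      have hloop : loopA maze ((visited.map List.length).sum) x y pvMoves path visited =
          some (out, v2) := by
        rw [pvFuelA, dfsA, if_neg hb] at hd
        exact hd
      obtain ⟨fb, hfb⟩ := bridge maze _ pvMoves x y path visited out v2 hloop [] out
        (by intro ho; exact ⟨1, by rw [loopB, ho]⟩)
        (fun r hr => hr)
      have hB : loopB maze (pvFuelB visited) [(x, y, pvMoves)] path visited ≠ none := by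
        apply suffB
        rw [pvFuelB]
        simp
        omega
      cases hg : loopB maze (pvFuelB visited) [(x, y, pvMoves)] path visited with
      | none => exact absurd hg hB
      | some res' =>
        have e1 := monoB_le maze (le_max_left fb (pvFuelB visited)) _ _ _ _ hfb
        have e2 := monoB_le maze (le_max_right fb (pvFuelB visited)) _ _ _ _ hg
        have he : out = res' := by
          have := e1.symm.trans e2
          injection this
        rw [if_neg hb]
        simp only []
        exact he
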